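-- pv_equiv track=rewrite | github.com/mgkulik/idr-lcr-struct | idr-lcr-struct/idrPdb.py | insert_gaps_2D
-- ===== SOURCE A (Python) =====
-- def insert_gaps_2D(seq, struc2D, tp=1, ch1='-', ch2='-'):
--     ''' Manages the gaps from the alignment depending on procedure should be executed:
--         tp=1 replace the value in the position
--         tp=2 add an extra value to the position. '''
--     pos = [i for i, letter in enumerate(seq) if letter == ch1]
--     for c in pos:
--         if (tp==1):
--             struc2D = struc2D[0:c]+ch2+struc2D[c:]
--         else:
--             struc2D = struc2D[0:c]+ch2+struc2D[c+1:]
--     return(struc2D)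
-- ===== SOURCE B (Python) =====
-- def insert_gaps_2D(seq, struc2D, tp=1, ch1='-', ch2='-'):
--     ''' Single left-to-right pass: finalized prefix chunks in `out`, the not-yet-
--         finalized suffix of the evolving string in `rest`; O(total size) overall. '''
--     out = []
--     rest = struc2D
--     done = 0                       # number of characters already finalized
--     for i, letter in enumerate(seq):
--         if letter == ch1:
--             take = min(i - done, len(rest))
--             out.append(rest[:take])
--             done += take
--             if tp == 1:
--                 rest = ch2 + rest[take:]
--             else:
--                 rest = ch2 + rest[take + 1:]
--     return ''.join(out) + rest
-- ===== Notes on version B (the rewrite author's own statement) =====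
-- stated objective: faster
-- what changed: Replaced the per-gap rebuild of the whole string by slicing (quadratic) with one left-to-right pass keeping finalized prefix chunks and the evolving suffix, joined once at the end.
import Mathlib
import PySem

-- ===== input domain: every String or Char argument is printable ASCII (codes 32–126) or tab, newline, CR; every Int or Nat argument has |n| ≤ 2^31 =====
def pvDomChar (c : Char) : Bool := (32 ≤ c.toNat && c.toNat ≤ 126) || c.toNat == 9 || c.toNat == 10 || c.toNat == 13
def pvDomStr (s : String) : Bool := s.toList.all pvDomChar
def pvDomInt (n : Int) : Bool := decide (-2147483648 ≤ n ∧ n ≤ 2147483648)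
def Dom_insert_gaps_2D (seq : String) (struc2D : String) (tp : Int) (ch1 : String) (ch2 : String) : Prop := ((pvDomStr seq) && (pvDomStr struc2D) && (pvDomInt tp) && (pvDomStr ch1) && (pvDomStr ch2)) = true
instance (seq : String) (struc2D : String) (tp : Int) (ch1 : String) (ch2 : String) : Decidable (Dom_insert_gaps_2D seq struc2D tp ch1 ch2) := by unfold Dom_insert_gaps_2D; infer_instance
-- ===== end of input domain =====

-- B replaces A's per-gap rebuild of the whole string by slicing with one left-to-right
-- pass over finalized prefix chunks and the evolving suffix (objective: faster).

-- ===== PORT A =====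
-- A's loop body: struc2D = struc2D[0:c]+ch2+struc2D[c:]  (tp==1)  /  struc2D[0:c]+ch2+struc2D[c+1:]
def stepA (tp : Int) (ch2 : List Char) (s : List Char) (c : Int) : List Char :=
  if tp == 1 then
    PySem.List.slice s (some 0) (some c) ++ ch2 ++ PySem.List.slice s (some c) none
  else
    PySem.List.slice s (some 0) (some c) ++ ch2 ++ PySem.List.slice s (some (c + 1)) none

def insert_gaps_2D (seq : String) (struc2D : String) (tp : Int) (ch1 : String) (ch2 : String) : String :=
  -- pos = [i for i, letter in enumerate(seq) if letter == ch1]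
  let pos := ((PySem.List.enumerate seq.toList 0).filter (fun p => String.ofList [p.2] == ch1)).map (·.1)
  String.ofList (pos.foldl (stepA tp ch2.toList) struc2D.toList)

-- ===== PORT B =====
-- B's loop body on state (out, rest, done): finalized chunks, evolving suffix, #finalized chars
def stepB (tp : Int) (ch2 : List Char) (st : List (List Char) × List Char × Int) (c : Int) :
    List (List Char) × List Char × Int :=
  let take := min (c - st.2.2) ((st.2.1.length : Int))
  let out' := st.1 ++ [PySem.List.slice st.2.1 none (some take)]
  let done' := st.2.2 + take
  let rest' := if tp == 1 then ch2 ++ PySem.List.slice st.2.1 (some take) none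
               else ch2 ++ PySem.List.slice st.2.1 (some (take + 1)) none
  (out', rest', done')

def insert_gaps_2D_alt (seq : String) (struc2D : String) (tp : Int) (ch1 : String) (ch2 : String) : String :=
  let fin := (PySem.List.enumerate seq.toList 0).foldl
    (fun st p => if String.ofList [p.2] == ch1 then stepB tp ch2.toList st p.1 else st)
    ([], struc2D.toList, 0)
  String.ofList (fin.1.flatten ++ fin.2.1)

-- ===== PRECONDITION & SPEC =====
def Spec_insert_gaps_2D (seq : String) (struc2D : String) (tp : Int) (ch1 : String) (ch2 : String) (out : String) : Prop := out = insert_gaps_2D_alt seq struc2D tp ch1 ch2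
instance (seq : String) (struc2D : String) (tp : Int) (ch1 : String) (ch2 : String) (out : String) : Decidable (Spec_insert_gaps_2D seq struc2D tp ch1 ch2 out) := by unfold Spec_insert_gaps_2D; infer_instance

-- ===== CLAIM (what is proved, stated in full; the proofs are below) =====
def Claim_equal_insert_gaps_2D : Prop := ∀ (seq : String) (struc2D : String) (tp : Int) (ch1 : String) (ch2 : String), Dom_insert_gaps_2D seq struc2D tp ch1 ch2 → Spec_insert_gaps_2D seq struc2D tp ch1 ch2 (insert_gaps_2D seq struc2D tp ch1 ch2)

-- ===== LEMMAS AND PROOFS =====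

-- a guarded fold over a list is a fold over the filtered, projected list
theorem foldl_guard_filter_map {α β γ : Type} (q : β → Bool) (h : β → γ) (f : α → γ → α) :
    ∀ (l : List β) (init : α),
      l.foldl (fun st p => if q p then f st (h p) else st) init
        = ((l.filter q).map h).foldl f init := by
  intro l
  induction l with
  | nil => intro init; rfl
  | cons x xs ih =>
    intro init
    by_cases hx : q x = true
    · simp [List.foldl_cons, hx, ih]
    · simp [List.foldl_cons, hx, ih]

-- main invariant: B's state (out, rest, done) with done = |out.flatten| ≤ every remaining
-- position represents A's evolving string as out.flatten ++ rest
theorem inv_stepB (tp : Int) (ch2 : List Char) :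
    ∀ (cs : List Int) (out : List (List Char)) (rest : List Char) (done : Int),
      done = (out.flatten.length : Int) →
      cs.Pairwise (· < ·) →
      (∀ c ∈ cs, done ≤ c) →
      (cs.foldl (stepB tp ch2) (out, rest, done)).1.flatten
          ++ (cs.foldl (stepB tp ch2) (out, rest, done)).2.1
        = cs.foldl (stepA tp ch2) (out.flatten ++ rest) := by
  intro cs
  induction cs with
  | nil => intro out rest done _ _ _; rfl
  | cons c cs ih =>
    intro out rest done hdone hpair hall
    have hd : done ≤ c := hall c (List.mem_cons_self ..)
    have h0 : 0 ≤ done := by rw [hdone]; exact Int.natCast_nonneg _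
    have hc0 : 0 ≤ c := le_trans h0 hd
    -- abbreviations for the new state
    have hpc := List.pairwise_cons.mp hpair
    set take : Int := min (c - done) ((rest.length : Int)) with htake
    have htk0 : 0 ≤ take := le_min (by omega) (Int.natCast_nonneg _)
    set t : Nat := take.toNat with ht
    have htt : take = (t : Int) := by rw [ht, Int.toNat_of_nonneg htk0]
    have htle : t ≤ rest.length := by omega
    have hslice_take : PySem.List.slice rest none (some take) = rest.take t := by
      rw [PySem.List.slice_to rest htk0]
    have hslice_drop : PySem.List.slice rest (some take) none = rest.drop t := by
      rw [PySem.List.slice_from rest htk0]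
    have hslice_drop1 : PySem.List.slice rest (some (take + 1)) none = rest.drop (t + 1) := by
      rw [PySem.List.slice_from rest (a := take + 1) (by omega)]
      congr 1; omega
    have hflen : out.flatten.length = done.toNat := by omega
    -- the one-step correspondence (d)
    have hstep : (out ++ [PySem.List.slice rest none (some take)]).flatten
        ++ (if tp == 1 then ch2 ++ PySem.List.slice rest (some take) none
            else ch2 ++ PySem.List.slice rest (some (take + 1)) none)
        = stepA tp ch2 (out.flatten ++ rest) c := by
      have hcn : done.toNat ≤ c.toNat := by omega
      have htakeA : PySem.List.slice (out.flatten ++ rest) (some 0) (some c)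
          = out.flatten ++ rest.take t := by
        rw [PySem.List.slice_zero_start, PySem.List.slice_to _ hc0,
            List.take_append, List.take_of_length_le (by omega), hflen]
        congr 1
        by_cases hcase : c.toNat - done.toNat ≤ rest.length
        · congr 1; omega
        · rw [List.take_of_length_le (by omega), List.take_of_length_le (by omega)]
      have hdropA : PySem.List.slice (out.flatten ++ rest) (some c) none = rest.drop t := by
        rw [PySem.List.slice_from _ hc0, List.drop_append,
            List.drop_of_length_le (by omega), hflen, List.nil_append]
        by_cases hcase : c.toNat - done.toNat ≤ rest.length
        · congr 1; omega
        · rw [List.drop_of_length_le (by omega), List.drop_of_length_le (by omega)]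
      have hdropA1 : PySem.List.slice (out.flatten ++ rest) (some (c + 1)) none
          = rest.drop (t + 1) := by
        rw [PySem.List.slice_from _ (a := c + 1) (by omega), List.drop_append,
            List.drop_of_length_le (by omega), hflen, List.nil_append]
        by_cases hcase : c.toNat - done.toNat ≤ rest.length
        · congr 1; omega
        · rw [List.drop_of_length_le (by omega), List.drop_of_length_le (by omega)]
      unfold stepA
      by_cases htp : (tp == 1) = true
      · simp only [htp, if_true, htakeA, hdropA, hslice_take, hslice_drop,
          List.flatten_append, List.flatten_cons, List.flatten_nil, List.append_nil,
          List.append_assoc]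
      · simp only [htp, if_false, Bool.false_eq_true, htakeA, hdropA1, hslice_take,
          hslice_drop1, List.flatten_append, List.flatten_cons, List.flatten_nil,
          List.append_nil, List.append_assoc]
    -- apply the induction hypothesis to the new state
    have hlen_take : (rest.take t).length = t := by
      rw [List.length_take]; omega
    have ih' := ih (out ++ [PySem.List.slice rest none (some take)])
        (if tp == 1 then ch2 ++ PySem.List.slice rest (some take) none
         else ch2 ++ PySem.List.slice rest (some (take + 1)) none)
        (done + take)
        (by rw [hslice_take]
            simp only [List.flatten_append, List.flatten_cons, List.flatten_nil,
              List.append_nil, List.length_append, hlen_take]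
            omega)
        hpc.2
        (by intro c' hc'
            have : c < c' := hpc.1 c' hc'
            omega)
    simp only [List.foldl_cons]
    show ((cs.foldl (stepB tp ch2) (stepB tp ch2 (out, rest, done) c)).1.flatten
        ++ (cs.foldl (stepB tp ch2) (stepB tp ch2 (out, rest, done) c)).2.1
      = cs.foldl (stepA tp ch2) (stepA tp ch2 (out.flatten ++ rest) c))
    rw [show stepB tp ch2 (out, rest, done) c
        = (out ++ [PySem.List.slice rest none (some take)],
           (if tp == 1 then ch2 ++ PySem.List.slice rest (some take) none
            else ch2 ++ PySem.List.slice rest (some (take + 1)) none),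
           done + take) from rfl]
    rw [ih', hstep]

-- ===== VERDICT (by name: the statement is the Claim_ definition above) =====
theorem insert_gaps_2D_spec : Claim_equal_insert_gaps_2D := by
  intro seq struc2D tp ch1 ch2 _
  show insert_gaps_2D seq struc2D tp ch1 ch2 = insert_gaps_2D_alt seq struc2D tp ch1 ch2
  simp only [insert_gaps_2D, insert_gaps_2D_alt]
  have hg := foldl_guard_filter_map (fun p : Int × Char => String.ofList [p.2] == ch1)
    (fun p : Int × Char => p.1) (stepB tp ch2.toList) (PySem.List.enumerate seq.toList 0)
    ([], struc2D.toList, 0)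
  beta_reduce at hg
  rw [hg]
  set pos := (((PySem.List.enumerate seq.toList 0).filter
      (fun p => String.ofList [p.2] == ch1)).map (·.1)) with hpos
  have hsub : pos.Sublist ((PySem.List.enumerate seq.toList 0).map (·.1)) :=
    ((PySem.List.enumerate seq.toList 0).filter_sublist).map _
  rw [PySem.List.map_fst_enumerate] at hsub
  have hpair : pos.Pairwise (· < ·) :=
    (PySem.List.pairwise_lt_pyRange_one 0 (0 + (seq.toList.length : Int))).sublist hsub
  have hall : ∀ c ∈ pos, (0 : Int) ≤ c := by
    intro c hc
    exact (PySem.List.mem_pyRange_one.mp (hsub.subset hc)).1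
  have := inv_stepB tp ch2.toList pos [] struc2D.toList 0 (by simp) hpair hall
  simp only [List.flatten_nil, List.nil_append] at this
  rw [this]
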